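-- pv_equiv track=rewrite | github.com/daniesky/debruijn_denovo_mf | src/de_bruijn_graph.py | get_masked_kmers
-- ===== SOURCE A (Python) =====
-- from itertools import combinations
--
-- def get_masked_kmers(kmer, mismatch_length):
--     """
--     Generates masked k-mers with up to `mismatch_length` mismatches in the original k-mer.
--
--     Parameters:
--     - kmer: The k-mer string to be masked.
--     - mismatch_length: The number of allowed mismatches in the masked k-mers.
--
--     Returns:
--     - list: A list of masked k-mers.
--     """
--     masked_kmers = set()
--     kmer_length = len(kmer)
--
--     # Generate all possible bitmasks with at most kmer_mask_length wildcards
--     for num_wildcards in range(0, mismatch_length + 1):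
--         for wildcard_positions in combinations(range(kmer_length), num_wildcards):
--             masked_kmer = list(kmer)
--             for pos in wildcard_positions:
--                 masked_kmer[pos] = '*'
--             masked_kmers.add(''.join(masked_kmer))
--
--     return masked_kmers
-- ===== SOURCE B (Python) =====
-- def get_masked_kmers(kmer, mismatch_length):
--     """Iterative breadth-first expansion: each level holds pairs (masked chars,
--     next free position); a level is grown by placing one more '*' at every
--     position to the right of the previous star.  No itertools, no per-count
--     combination enumeration."""
--     masked = set()
--     if mismatch_length < 0:
--         return masked
--     n = len(kmer)
--     level = [(list(kmer), 0)]
--     masked.add(kmer)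
--     for _ in range(min(mismatch_length, n)):
--         nxt = []
--         for chars, start in level:
--             for pos in range(start, n):
--                 new = chars[:]
--                 new[pos] = '*'
--                 nxt.append((new, pos + 1))
--                 masked.add(''.join(new))
--         level = nxt
--     return masked
-- ===== Notes on version B (the rewrite author's own statement) =====
-- stated objective: alternative
-- what changed: Replaces the per-wildcard-count loop over itertools.combinations plus char-list mutation with an iterative breadth-first level expansion: each level keeps (masked chars, next free position) pairs and is grown by placing one more '*' to the right of the previous star, capped at min(mismatch_length, len(kmer)) levels.
import Mathlib
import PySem

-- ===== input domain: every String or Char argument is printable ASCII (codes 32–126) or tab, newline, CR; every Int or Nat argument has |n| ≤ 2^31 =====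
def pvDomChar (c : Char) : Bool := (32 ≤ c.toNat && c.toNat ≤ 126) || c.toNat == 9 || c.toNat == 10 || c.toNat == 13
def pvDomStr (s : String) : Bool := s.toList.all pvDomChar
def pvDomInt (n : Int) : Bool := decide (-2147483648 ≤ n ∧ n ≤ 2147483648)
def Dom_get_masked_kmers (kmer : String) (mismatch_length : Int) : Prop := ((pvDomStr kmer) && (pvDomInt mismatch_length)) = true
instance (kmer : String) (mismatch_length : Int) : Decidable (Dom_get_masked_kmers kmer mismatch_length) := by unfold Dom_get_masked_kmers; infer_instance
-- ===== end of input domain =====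

-- B replaces the combinations-based per-wildcard-count enumeration with an iterative
-- breadth-first level expansion over (masked chars, next free position) pairs; objective: alternative.

-- ===== PORT A =====
-- start index right after the last chosen position (0 for the empty choice)
def pvNextStart (c : List Nat) : Nat := c.foldl (fun _ p => p + 1) 0

-- exact hand port of itertools.combinations(range(n), w): the w-subsets of 0..n-1 in
-- lexicographic order, each subset extended by appending its next (largest) element
def pvCombos (n : Nat) : Nat → List (List Nat)
  | 0 => [[]]
  | w + 1 => (pvCombos n w).flatMap
      (fun c => (List.range' (pvNextStart c) (n - pvNextStart c)).map (fun p => c ++ [p]))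

def get_masked_kmers (kmer : String) (mismatch_length : Int) : List String :=
  (PySem.List.pyRange 0 (mismatch_length + 1) 1).foldl
    (fun masked_kmers num_wildcards =>
      (pvCombos kmer.toList.length num_wildcards.toNat).foldl
        (fun masked_kmers wildcard_positions =>
          PySem.Set.add masked_kmers
            (String.mk (wildcard_positions.foldl (fun mk pos => mk.set pos '*') kmer.toList)))
        masked_kmers)
    PySem.Set.empty

-- ===== PORT B =====
def get_masked_kmers_alt (kmer : String) (mismatch_length : Int) : List String :=
  if mismatch_length < 0 then PySem.Set.empty
  else
    -- n = len(kmer) inlined; `for _ in range(min(mismatch_length, n))` over a nonneg bound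
    ((List.range (min mismatch_length (kmer.toList.length : Int)).toNat).foldl
      (fun (st : List (List Char × Nat) × List String) _ =>
        st.1.foldl
          (fun st2 pr =>
            -- range(start, n) ported as List.range' start (n - start); exact since start : Nat, start ≤ n
            (List.range' pr.2 (kmer.toList.length - pr.2)).foldl
              (fun st3 pos =>
                (st3.1 ++ [(pr.1.set pos '*', pos + 1)],
                 PySem.Set.add st3.2 (String.mk (pr.1.set pos '*'))))
              st2)
          ([], st.2))
      ([(kmer.toList, 0)], PySem.Set.add PySem.Set.empty (String.mk kmer.toList))).2

-- ===== PRECONDITION & SPEC =====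
def Spec_get_masked_kmers (kmer : String) (mismatch_length : Int) (out : List String) : Prop := out = get_masked_kmers_alt kmer mismatch_length
instance (kmer : String) (mismatch_length : Int) (out : List String) : Decidable (Spec_get_masked_kmers kmer mismatch_length out) := by unfold Spec_get_masked_kmers; infer_instance

-- ===== CLAIM (what is proved, stated in full; the proofs are below) =====
def Claim_equal_get_masked_kmers : Prop := ∀ (kmer : String) (mismatch_length : Int), Dom_get_masked_kmers kmer mismatch_length → Spec_get_masked_kmers kmer mismatch_length (get_masked_kmers kmer mismatch_length)

-- ===== LEMMAS AND PROOFS =====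

-- apply a combo of positions to the character list
def pvApply (cs : List Char) (c : List Nat) : List Char :=
  c.foldl (fun a p => a.set p '*') cs

def pvExpand (n : Nat) (pr : List Char × Nat) : List (List Char × Nat) :=
  (List.range' pr.2 (n - pr.2)).map (fun pos => (pr.1.set pos '*', pos + 1))

lemma pvNextStart_append (c : List Nat) (p : Nat) : pvNextStart (c ++ [p]) = p + 1 := by
  simp [pvNextStart]

lemma pvApply_append (cs : List Char) (c : List Nat) (p : Nat) :
    pvApply cs (c ++ [p]) = (pvApply cs c).set p '*' := by
  simp [pvApply]

-- bounds on pvNextStart over pvCombos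
lemma pvCombos_nextStart (n w : Nat) : ∀ c ∈ pvCombos n w, w ≤ pvNextStart c ∧ pvNextStart c ≤ n := by
  induction w with
  | zero => intro c hc; simp [pvCombos] at hc; subst hc; simp [pvNextStart]
  | succ w ih =>
      intro c hc
      simp only [pvCombos, List.mem_flatMap, List.mem_map, List.mem_range'] at hc
      obtain ⟨c', hc', p, hp, rfl⟩ := hc
      obtain ⟨h1, h2⟩ := ih c' hc'
      rw [pvNextStart_append]
      omega

lemma pvCombos_nil (n w : Nat) (h : n < w) : pvCombos n w = [] := by
  induction w with
  | zero => omega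
  | succ w ih =>
      rcases Nat.lt_or_ge n w with hw | hw
      · simp [pvCombos, ih hw]
      · have hn : n = w := by omega
        subst hn
        simp only [pvCombos, List.flatMap_eq_nil_iff]
        intro c hc
        have hb := pvCombos_nextStart n n c hc
        have hz : n - pvNextStart c = 0 := by omega
        rw [hz]
        rfl

-- the innermost loop of B on a position list
lemma pvInner (f : Nat → List Char × Nat) (g : Nat → String) :
    ∀ (ps : List Nat) (a : List (List Char × Nat)) (s : List String),
    ps.foldl (fun st3 pos => (st3.1 ++ [f pos], PySem.Set.add st3.2 (g pos))) (a, s)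
      = (a ++ ps.map f, (ps.map g).foldl PySem.Set.add s) := by
  intro ps
  induction ps with
  | nil => intro a s; simp
  | cons p ps ih => intro a s; simp [ih]

-- the middle loop of B over a level
lemma pvMiddle (n : Nat) :
    ∀ (L : List (List Char × Nat)) (a : List (List Char × Nat)) (s : List String),
    L.foldl
      (fun st2 pr =>
        (List.range' pr.2 (n - pr.2)).foldl
          (fun st3 pos =>
            (st3.1 ++ [(pr.1.set pos '*', pos + 1)],
             PySem.Set.add st3.2 (String.mk (pr.1.set pos '*')))) st2)
      (a, s)
      = (a ++ L.flatMap (pvExpand n),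
         ((L.flatMap (pvExpand n)).map (fun pr => String.mk pr.1)).foldl PySem.Set.add s) := by
  intro L
  induction L with
  | nil => intro a s; simp
  | cons pr L ih =>
      intro a s
      simp only [List.foldl_cons]
      rw [pvInner (fun pos => (pr.1.set pos '*', pos + 1)) (fun pos => String.mk (pr.1.set pos '*'))]
      rw [ih]
      simp [pvExpand, List.map_map, Function.comp_def]

-- per-count adding step, shared shape of both programs
def pvF (cs : List Char) (a : List String) (w : Nat) : List String :=
  ((pvCombos cs.length w).map (fun c => String.mk (pvApply cs c))).foldl PySem.Set.add a

-- expanding the level of count w gives the level of count w+1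
lemma pvLevel_step (cs : List Char) (w : Nat) :
    ((pvCombos cs.length w).map (fun c => (pvApply cs c, pvNextStart c))).flatMap (pvExpand cs.length)
      = (pvCombos cs.length (w + 1)).map (fun c => (pvApply cs c, pvNextStart c)) := by
  rw [List.flatMap_map]
  show (pvCombos cs.length w).flatMap
      (fun c => pvExpand cs.length (pvApply cs c, pvNextStart c)) = _
  have h : ∀ c : List Nat,
      pvExpand cs.length (pvApply cs c, pvNextStart c)
        = ((List.range' (pvNextStart c) (cs.length - pvNextStart c)).map (fun p => c ++ [p])).map
            (fun c' => (pvApply cs c', pvNextStart c')) := by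
    intro c
    simp [pvExpand, List.map_map, Function.comp, pvApply_append, pvNextStart_append]
  simp only [h]
  rw [show (pvCombos cs.length (w + 1)) = (pvCombos cs.length w).flatMap
        (fun c => (List.range' (pvNextStart c) (cs.length - pvNextStart c)).map (fun p => c ++ [p]))
      from rfl]
  rw [List.map_flatMap]

-- state invariant of B's outer loop
lemma pvState (cs : List Char) (t : Nat) :
    (List.range t).foldl
      (fun (st : List (List Char × Nat) × List String) _ =>
        st.1.foldl
          (fun st2 pr =>
            (List.range' pr.2 (cs.length - pr.2)).foldl
              (fun st3 pos =>
                (st3.1 ++ [(pr.1.set pos '*', pos + 1)],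
                 PySem.Set.add st3.2 (String.mk (pr.1.set pos '*'))))
              st2)
          ([], st.2))
      ([(cs, 0)], PySem.Set.add PySem.Set.empty (String.mk cs))
      = ((pvCombos cs.length t).map (fun c => (pvApply cs c, pvNextStart c)),
         (List.range (t + 1)).foldl (pvF cs) PySem.Set.empty) := by
  induction t with
  | zero =>
      simp [pvCombos, pvApply, pvNextStart, pvF, List.range_succ, PySem.Set.add]
  | succ t ih =>
      rw [List.range_succ, List.foldl_append, ih]
      simp only [List.foldl_cons, List.foldl_nil]
      rw [pvMiddle cs.length]
      rw [pvLevel_step cs t]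
      simp only [List.nil_append]
      congr 1
      rw [List.range_succ (n := t + 1), List.foldl_append]
      simp only [List.foldl_cons, List.foldl_nil]
      rw [pvF]
      simp only [List.foldl_map]

-- counts beyond the length contribute nothing
lemma pvTail (cs : List Char) (l : List Nat) (h : ∀ w ∈ l, cs.length < w) (a : List String) :
    l.foldl (pvF cs) a = a := by
  induction l generalizing a with
  | nil => rfl
  | cons w l ih =>
      have : pvCombos cs.length w = [] := pvCombos_nil _ _ (h w (by simp))
      simp only [List.foldl_cons, pvF, this, List.map_nil, List.foldl_nil]
      exact ih (fun x hx => h x (by simp [hx])) a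

-- A's program is the pvF fold over 0..m
lemma pvA_eq (kmer : String) (m : Int) :
    get_masked_kmers kmer m
      = (List.range (m + 1).toNat).foldl (pvF kmer.toList) PySem.Set.empty := by
  unfold get_masked_kmers
  rw [PySem.List.pyRange_one, List.foldl_map]
  simp only [Int.sub_zero]
  apply PySem.List.foldl_congr_mem
  intro a w _
  simp only [Int.zero_add, Int.toNat_natCast]
  rw [pvF, List.foldl_map]
  rfl

-- ===== VERDICT (by name: the statement is the Claim_ definition above) =====
theorem get_masked_kmers_spec : Claim_equal_get_masked_kmers := by
  intro kmer m _
  unfold Spec_get_masked_kmers get_masked_kmers_alt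
  by_cases hm : m < 0
  · rw [if_pos hm, pvA_eq]
    have : (m + 1).toNat = 0 := by omega
    rw [this]
    rfl
  · rw [if_neg hm, pvState kmer.toList, pvA_eq]
    by_cases hle : m ≤ (kmer.toList.length : Int)
    · have h0 : (m + 1).toNat = (min m (kmer.toList.length : Int)).toNat + 1 := by omega
      rw [h0]
    · have h1 : (min m (kmer.toList.length : Int)).toNat = kmer.toList.length := by omega
      have h2 : (m + 1).toNat = (kmer.toList.length + 1) + (m.toNat - kmer.toList.length) := by omega
      rw [h1, h2, List.range_add, List.foldl_append]
      rw [pvTail kmer.toList _ (fun w hw => by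
        simp only [List.mem_map, List.mem_range] at hw
        obtain ⟨k, _, rfl⟩ := hw
        omega)]
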